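-- pv_equiv track=rewrite | github.com/phj0446/Soon | 프로그래머스/unrated/181926. 수 조작하기 1/수 조작하기 1.py | solution
-- ===== SOURCE A (Python) =====
-- def solution(n, control):
--     answer = 0
--     for i in range(0, len(control)):
--         if control[i] == "w":
--             n += 1
--         elif control[i] == "s":
--             n -= 1
--         elif control[i] == "d":
--             n += 10
--         else:
--             n -= 10
--     answer = n
--     return answer
-- ===== SOURCE B (Python) =====
-- def solution(n, control):
--     w = control.count('w')
--     s = control.count('s')
--     d = control.count('d')
--     other = len(control) - w - s - d
--     return n + w - s + 10 * d - 10 * other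
-- ===== Notes on version B (the rewrite author's own statement) =====
-- stated objective: simpler
-- what changed: Replaced the per-character branching loop by aggregate counts of 'w','s','d' plus a len-based residue for all other characters and one closed-form arithmetic expression.
import Mathlib
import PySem

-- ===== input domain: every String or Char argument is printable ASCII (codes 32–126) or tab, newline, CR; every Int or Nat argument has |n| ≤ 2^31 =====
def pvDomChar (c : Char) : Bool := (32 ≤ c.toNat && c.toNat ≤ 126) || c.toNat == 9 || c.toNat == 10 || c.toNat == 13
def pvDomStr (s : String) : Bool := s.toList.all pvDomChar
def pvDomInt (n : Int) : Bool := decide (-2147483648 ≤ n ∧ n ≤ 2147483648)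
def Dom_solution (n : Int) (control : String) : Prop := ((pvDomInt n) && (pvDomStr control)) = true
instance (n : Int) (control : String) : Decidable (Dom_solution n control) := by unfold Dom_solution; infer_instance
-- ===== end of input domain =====

-- B replaces A's per-character branching loop by three character counts and one closed-form
-- arithmetic expression (objective: simpler).

-- ===== PORT A =====
-- A walks the string once, updating n per character (w:+1, s:-1, d:+10, else:-10).
def solution (n : Int) (control : String) : Int :=
  control.toList.foldl
    (fun n c =>
      if c == 'w' then n + 1
      else if c == 's' then n - 1
      else if c == 'd' then n + 10
      else n - 10) n

-- ===== PORT B =====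
-- Source B: counts of 'w','s','d' (str.count on a single char = List.count on the code points),
-- other = len - w - s - d, result by one formula.
def solution_alt (n : Int) (control : String) : Int :=
  let w : Int := control.toList.count 'w'
  let s : Int := control.toList.count 's'
  let d : Int := control.toList.count 'd'
  let other : Int := (control.toList.length : Int) - w - s - d
  n + w - s + 10 * d - 10 * other

-- ===== PRECONDITION & SPEC =====
def Spec_solution (n : Int) (control : String) (out : Int) : Prop := out = solution_alt n control
instance (n : Int) (control : String) (out : Int) : Decidable (Spec_solution n control out) := by unfold Spec_solution; infer_instance

-- ===== CLAIM (what is proved, stated in full; the proofs are below) =====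
def Claim_equal_solution : Prop := ∀ (n : Int) (control : String), Dom_solution n control → Spec_solution n control (solution n control)

-- ===== LEMMAS AND PROOFS =====

lemma solution_foldl (cs : List Char) (n : Int) :
    cs.foldl
      (fun n c =>
        if c == 'w' then n + 1
        else if c == 's' then n - 1
        else if c == 'd' then n + 10
        else n - 10) n
    = n + cs.count 'w' - cs.count 's' + 10 * cs.count 'd'
        - 10 * ((cs.length : Int) - cs.count 'w' - cs.count 's' - cs.count 'd') := by
  induction cs generalizing n with
  | nil => simp
  | cons c t ih =>
    simp only [List.foldl_cons, ih, List.count_cons, List.length_cons]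
    by_cases hw : c = 'w' <;> by_cases hs : c = 's' <;> by_cases hd : c = 'd' <;>
      simp_all <;> ring

-- ===== VERDICT (by name: the statement is the Claim_ definition above) =====
theorem solution_spec : Claim_equal_solution := by
  intro n control _
  unfold Spec_solution solution solution_alt
  exact solution_foldl control.toList n
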